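-- pv_equiv track=rewrite | github.com/maciejjankowski/api-evergrow | app/utils/anonymization.py | _anonymize_role
-- ===== SOURCE A (Python) =====
-- def _anonymize_role(role: str) -> str:
--     """Generalize professional role to protect identity"""
--     if not role:
--         return 'unspecified'
--
--     role_lower = role.lower()
--     if any(term in role_lower for term in ['ceo', 'chief executive', 'president']):
--         return 'c_level_executive'
--     elif any(term in role_lower for term in ['cto', 'chief technology', 'vp engineering']):
--         return 'technical_executive'
--     elif any(term in role_lower for term in ['cfo', 'chief financial']):
--         return 'financial_executive'
--     elif any(term in role_lower for term in ['manager', 'director', 'head of']):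
--         return 'management_role'
--     elif any(term in role_lower for term in ['senior', 'lead', 'principal']):
--         return 'senior_individual_contributor'
--     else:
--         return 'individual_contributor'
-- ===== SOURCE B (Python) =====
-- # Priority index per keyword; CATEGORIES[i] is the label of priority i,
-- # CATEGORIES[5] is the fall-through default.
-- KEYWORD_PRIORITY = {
--     'ceo': 0, 'chief executive': 0, 'president': 0,
--     'cto': 1, 'chief technology': 1, 'vp engineering': 1,
--     'cfo': 2, 'chief financial': 2,
--     'manager': 3, 'director': 3, 'head of': 3,
--     'senior': 4, 'lead': 4, 'principal': 4,
-- }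
--
-- CATEGORIES = [
--     'c_level_executive',
--     'technical_executive',
--     'financial_executive',
--     'management_role',
--     'senior_individual_contributor',
--     'individual_contributor',
-- ]
--
--
-- def _anonymize_role(role: str) -> str:
--     """Generalize professional role to protect identity"""
--     if not role:
--         return 'unspecified'
--     role_lower = role.lower()
--     # Aggregate: best (smallest) priority among ALL matching keywords,
--     # instead of an ordered chain of short-circuiting membership tests.
--     best = 5
--     for term, priority in KEYWORD_PRIORITY.items():
--         if term in role_lower and priority < best:
--             best = priority
--     return CATEGORIES[best]
-- ===== Notes on version B (the rewrite author's own statement) =====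
-- stated objective: alternative
-- what changed: B replaces A's ordered short-circuiting if/elif chain by an aggregation: every keyword carries a priority index, one pass over all keywords computes the minimum priority among all matches, and the answer is a table lookup CATEGORIES[best]; correctness relies on the first matching group in A's order being exactly the minimum-priority matching keyword.
import Mathlib
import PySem

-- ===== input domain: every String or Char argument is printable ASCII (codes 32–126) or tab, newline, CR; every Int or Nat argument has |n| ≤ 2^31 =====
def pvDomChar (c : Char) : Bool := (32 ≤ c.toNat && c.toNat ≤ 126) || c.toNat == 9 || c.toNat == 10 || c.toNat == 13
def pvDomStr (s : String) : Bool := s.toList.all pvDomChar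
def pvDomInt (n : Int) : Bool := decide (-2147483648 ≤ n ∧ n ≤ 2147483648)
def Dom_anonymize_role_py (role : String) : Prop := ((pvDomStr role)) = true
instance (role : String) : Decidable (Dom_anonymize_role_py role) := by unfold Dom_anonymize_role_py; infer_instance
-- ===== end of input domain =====

-- B replaces A's ordered if/elif chain by a min-priority aggregation over a keyword table (objective: alternative).

-- ===== PORT A =====
-- literal transliteration of A's if/elif chain; 'term in role_lower' = PySem.Str.isIn
def anonymize_role_py (role : String) : String :=
  if role == "" then "unspecified"
  else
    let role_lower := PySem.Str.lower role
    if ["ceo", "chief executive", "president"].any (fun term => PySem.Str.isIn term role_lower) then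
      "c_level_executive"
    else if ["cto", "chief technology", "vp engineering"].any (fun term => PySem.Str.isIn term role_lower) then
      "technical_executive"
    else if ["cfo", "chief financial"].any (fun term => PySem.Str.isIn term role_lower) then
      "financial_executive"
    else if ["manager", "director", "head of"].any (fun term => PySem.Str.isIn term role_lower) then
      "management_role"
    else if ["senior", "lead", "principal"].any (fun term => PySem.Str.isIn term role_lower) then
      "senior_individual_contributor"
    else
      "individual_contributor"

-- ===== PORT B =====
-- Source B's KEYWORD_PRIORITY dict (insertion order) and CATEGORIES table
def pvKeywordPriority : List (String × Nat) :=
  [ ("ceo", 0), ("chief executive", 0), ("president", 0),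
    ("cto", 1), ("chief technology", 1), ("vp engineering", 1),
    ("cfo", 2), ("chief financial", 2),
    ("manager", 3), ("director", 3), ("head of", 3),
    ("senior", 4), ("lead", 4), ("principal", 4) ]

def pvCategories : List String :=
  [ "c_level_executive", "technical_executive", "financial_executive",
    "management_role", "senior_individual_contributor", "individual_contributor" ]

-- Source B's 'for term, priority in KEYWORD_PRIORITY.items(): if term in rl and priority < best: best = priority'
def pvStep (rl : String) (best : Nat) (tp : String × Nat) : Nat :=
  if PySem.Str.isIn tp.1 rl && decide (tp.2 < best) then tp.2 else best

def anonymize_role_py_alt (role : String) : String :=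
  if role == "" then "unspecified"
  else
    let role_lower := PySem.Str.lower role
    let best := pvKeywordPriority.foldl (pvStep role_lower) 5
    -- CATEGORIES[best]; best is always 0..5, so the index is always in range
    (PySem.List.pyGet? pvCategories (best : Int)).getD ""

-- ===== PRECONDITION & SPEC =====
def Spec_anonymize_role_py (role : String) (out : String) : Prop := out = anonymize_role_py_alt role
instance (role : String) (out : String) : Decidable (Spec_anonymize_role_py role out) := by unfold Spec_anonymize_role_py; infer_instance

-- ===== CLAIM =====
def Claim_equal_anonymize_role_py : Prop := ∀ (role : String), Dom_anonymize_role_py role → Spec_anonymize_role_py role (anonymize_role_py role)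

-- ===== LEMMAS AND PROOFS =====

-- folding pvStep over a 3-keyword group of equal priority p: best drops to p iff some keyword matches and p < best
theorem pvFold_group3 (rl t1 t2 t3 : String) (p b : Nat) :
    List.foldl (pvStep rl) b [(t1, p), (t2, p), (t3, p)] =
      if (PySem.Str.isIn t1 rl || PySem.Str.isIn t2 rl || PySem.Str.isIn t3 rl) && decide (p < b) then p
      else b := by
  by_cases h1 : PySem.Str.isIn t1 rl = true <;>
  by_cases h2 : PySem.Str.isIn t2 rl = true <;>
  by_cases h3 : PySem.Str.isIn t3 rl = true <;>
  by_cases hb : p < b <;>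
  simp_all [pvStep, List.foldl] <;> split_ifs <;> omega

-- the 2-keyword group
theorem pvFold_group2 (rl t1 t2 : String) (p b : Nat) :
    List.foldl (pvStep rl) b [(t1, p), (t2, p)] =
      if (PySem.Str.isIn t1 rl || PySem.Str.isIn t2 rl) && decide (p < b) then p
      else b := by
  by_cases h1 : PySem.Str.isIn t1 rl = true <;>
  by_cases h2 : PySem.Str.isIn t2 rl = true <;>
  by_cases hb : p < b <;>
  simp_all [pvStep, List.foldl] <;> split_ifs <;> omega

-- B's whole fold as a function of the five group-match booleans
theorem pvFold_eval (rl : String) :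
    pvKeywordPriority.foldl (pvStep rl) 5 =
      (if PySem.Str.isIn "ceo" rl || PySem.Str.isIn "chief executive" rl || PySem.Str.isIn "president" rl then 0
       else if PySem.Str.isIn "cto" rl || PySem.Str.isIn "chief technology" rl || PySem.Str.isIn "vp engineering" rl then 1
       else if PySem.Str.isIn "cfo" rl || PySem.Str.isIn "chief financial" rl then 2
       else if PySem.Str.isIn "manager" rl || PySem.Str.isIn "director" rl || PySem.Str.isIn "head of" rl then 3
       else if PySem.Str.isIn "senior" rl || PySem.Str.isIn "lead" rl || PySem.Str.isIn "principal" rl then 4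
       else 5) := by
  have hsplit : pvKeywordPriority =
      [("ceo",0),("chief executive",0),("president",0)] ++
      ([("cto",1),("chief technology",1),("vp engineering",1)] ++
      ([("cfo",2),("chief financial",2)] ++
      ([("manager",3),("director",3),("head of",3)] ++
      [("senior",4),("lead",4),("principal",4)]))) := rfl
  rw [hsplit]
  rw [List.foldl_append, List.foldl_append, List.foldl_append, List.foldl_append]
  rw [pvFold_group3, pvFold_group3, pvFold_group2, pvFold_group3, pvFold_group3]
  by_cases a0 : (PySem.Str.isIn "ceo" rl || PySem.Str.isIn "chief executive" rl || PySem.Str.isIn "president" rl) = true <;>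
  by_cases a1 : (PySem.Str.isIn "cto" rl || PySem.Str.isIn "chief technology" rl || PySem.Str.isIn "vp engineering" rl) = true <;>
  by_cases a2 : (PySem.Str.isIn "cfo" rl || PySem.Str.isIn "chief financial" rl) = true <;>
  by_cases a3 : (PySem.Str.isIn "manager" rl || PySem.Str.isIn "director" rl || PySem.Str.isIn "head of" rl) = true <;>
  by_cases a4 : (PySem.Str.isIn "senior" rl || PySem.Str.isIn "lead" rl || PySem.Str.isIn "principal" rl) = true <;>
  simp_all

-- ===== VERDICT =====
theorem anonymize_role_py_spec : Claim_equal_anonymize_role_py := by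
  intro role _
  unfold Spec_anonymize_role_py anonymize_role_py anonymize_role_py_alt
  by_cases hr : role == ""
  · simp [hr]
  · simp only [hr, if_neg, Bool.false_eq_true, not_false_iff]
    rw [pvFold_eval]
    set rl := PySem.Str.lower role
    by_cases a0 : (PySem.Str.isIn "ceo" rl || PySem.Str.isIn "chief executive" rl || PySem.Str.isIn "president" rl) = true <;>
    by_cases a1 : (PySem.Str.isIn "cto" rl || PySem.Str.isIn "chief technology" rl || PySem.Str.isIn "vp engineering" rl) = true <;>
    by_cases a2 : (PySem.Str.isIn "cfo" rl || PySem.Str.isIn "chief financial" rl) = true <;>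
    by_cases a3 : (PySem.Str.isIn "manager" rl || PySem.Str.isIn "director" rl || PySem.Str.isIn "head of" rl) = true <;>
    by_cases a4 : (PySem.Str.isIn "senior" rl || PySem.Str.isIn "lead" rl || PySem.Str.isIn "principal" rl) = true <;>
    simp_all [pvCategories, PySem.List.pyGet?, PySem.List.pyIdx?, or_assoc]
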